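-- pv_equiv track=rewrite | github.com/Anacortes-Coding-Club/AP_Create_Task_Example | tourney.py | b2b_count
-- ===== SOURCE A (Python) =====
-- def b2b_count(teams, schedule):
--     """Count the number of back-to-back games for each team"""
--
--     b2b_counts = dict()
--     for team in teams:
--         b2b_count = 0
--         days_played = []
--         for i, day in enumerate(schedule):
--             for game in day:
--                 if team in game:
--                     days_played.append(i)
--         for i in range(1, len(schedule)):
--             if all(j in days_played for j in range(i - 1, i + 1)):
--                 b2b_count += 1
--         b2b_counts[team] = b2b_count
--     return sum(b2b_counts.values())
-- ===== SOURCE B (Python) =====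
-- def b2b_count(teams, schedule):
--     """Count the number of back-to-back games for each team"""
--     day_teams = [{t for game in day for t in game} for day in schedule]
--     total = 0
--     for d in range(1, len(day_teams)):
--         prev, cur = day_teams[d - 1], day_teams[d]
--         for team in dict.fromkeys(teams):
--             if team in prev and team in cur:
--                 total += 1
--     return total
-- ===== Notes on version B (the rewrite author's own statement) =====
-- stated objective: faster
-- what changed: Instead of rescanning the entire schedule once per team to build a days-played list and a per-team dict, B builds per-day team sets in one pass over the schedule and then makes a single pass over adjacent day pairs, counting each deduplicated team found in both days' sets.
import Mathlib
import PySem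

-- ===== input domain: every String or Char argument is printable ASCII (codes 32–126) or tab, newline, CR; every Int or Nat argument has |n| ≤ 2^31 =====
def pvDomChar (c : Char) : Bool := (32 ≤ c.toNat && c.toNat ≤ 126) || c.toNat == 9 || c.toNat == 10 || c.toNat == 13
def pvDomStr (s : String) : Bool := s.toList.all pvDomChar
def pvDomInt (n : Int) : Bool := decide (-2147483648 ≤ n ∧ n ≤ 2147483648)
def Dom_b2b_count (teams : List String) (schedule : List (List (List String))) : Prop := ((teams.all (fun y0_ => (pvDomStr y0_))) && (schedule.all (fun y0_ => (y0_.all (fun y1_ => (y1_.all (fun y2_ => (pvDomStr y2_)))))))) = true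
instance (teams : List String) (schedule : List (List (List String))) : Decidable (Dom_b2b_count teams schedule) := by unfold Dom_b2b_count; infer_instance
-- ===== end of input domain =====

-- B replaces A's per-team rescans of the whole schedule by per-day team sets and one pass
-- over adjacent day pairs (objective: alternative traversal; same return value).

-- ===== PORT A =====
-- A's days_played list for one team ('for i, day in enumerate(schedule): for game in day: if team in game: days_played.append(i)')
def dpA (team : String) (schedule : List (List (List String))) : List Int :=
  (PySem.List.enumerate schedule 0).foldl
    (fun dp p => p.2.foldl (fun dp2 game => if game.contains team then dp2 ++ [p.1] else dp2) dp) []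

-- A's 'for i in range(1, len(schedule)): if all(j in days_played for j in range(i-1, i+1)): b2b_count += 1'
def countA (dp : List Int) (n : Int) : Int :=
  (PySem.List.pyRange 1 n 1).foldl
    (fun c i => if (PySem.List.pyRange (i - 1) (i + 1) 1).all (fun j => dp.contains j) then c + 1 else c) 0

def b2b_count (teams : List String) (schedule : List (List (List String))) : Int :=
  (teams.foldl
    (fun (d : PySem.Dict String Int) team =>
      d.insert team (countA (dpA team schedule) (schedule.length : Int))) PySem.Dict.empty).values.sum

-- ===== PORT B =====
-- day_teams[d] = set of teams appearing in any game on day d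
def dayTeamsB (schedule : List (List (List String))) : List (PySem.Set String) :=
  schedule.map (fun day => PySem.Set.ofList (day.flatMap (fun g => g)))

def b2b_count_alt (teams : List String) (schedule : List (List (List String))) : Int :=
  let dts := dayTeamsB schedule
  (PySem.List.pyRange 1 (dts.length : Int) 1).foldl
    (fun tot d =>
      let prev := PySem.List.pyGetD dts (d - 1) []
      let cur := PySem.List.pyGetD dts d []
      (PySem.List.dedup teams).foldl
        (fun tot2 team => if prev.contains team && cur.contains team then tot2 + 1 else tot2) tot) 0

-- ===== PRECONDITION & SPEC =====
def Spec_b2b_count (teams : List String) (schedule : List (List (List String))) (out : Int) : Prop := out = b2b_count_alt teams schedule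
instance (teams : List String) (schedule : List (List (List String))) (out : Int) : Decidable (Spec_b2b_count teams schedule out) := by unfold Spec_b2b_count; infer_instance

-- ===== CLAIM (what is proved, stated in full; the proofs are below) =====
def Claim_equal_b2b_count : Prop := ∀ (teams : List String) (schedule : List (List (List String))), Dom_b2b_count teams schedule → Spec_b2b_count teams schedule (b2b_count teams schedule)

-- ===== LEMMAS AND PROOFS =====

-- A's days_played loop as one flatMap
theorem dpA_eq (team : String) (schedule : List (List (List String))) :
    dpA team schedule =
      (PySem.List.enumerate schedule 0).flatMap
        (fun p => (p.2.filter (fun g => g.contains team)).map (fun _ => p.1)) := by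
  unfold dpA
  rw [PySem.List.foldl_congr_mem _ _
      (fun dp p => dp ++ (p.2.filter (fun g => g.contains team)).map (fun _ => p.1)) _ ?_]
  · rw [PySem.List.foldl_append_eq_flatMap]; simp
  · intro acc p _
    exact PySem.List.foldl_append_if _ _ _ _

-- membership in days_played = 'team plays on day k'
theorem mem_dpA (team : String) (schedule : List (List (List String))) (j : Int) :
    j ∈ dpA team schedule ↔
      ∃ (k : Nat) (h : k < schedule.length), j = (k : Int) ∧ schedule[k].any (fun g => g.contains team) = true := by
  rw [dpA_eq]
  simp only [List.mem_flatMap, List.mem_map, List.mem_filter, PySem.List.mem_enumerate_iff,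
    List.any_eq_true]
  constructor
  · rintro ⟨p, ⟨k, hk, rfl⟩, g, ⟨hg, hc⟩, rfl⟩
    exact ⟨k, hk, by simp, g, hg, hc⟩
  · rintro ⟨k, hk, rfl, g, hg, hc⟩
    exact ⟨(0 + (k : Int), schedule[k]), ⟨k, hk, rfl⟩, g, ⟨hg, hc⟩, by simp⟩

-- B's per-day set membership = 'team plays on day j'
theorem contains_dayTeamsB (team : String) (schedule : List (List (List String))) (j : Int)
    (h0 : 0 ≤ j) (h1 : j < (schedule.length : Int)) :
    (PySem.List.pyGetD (dayTeamsB schedule) j []).contains team =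
      (schedule.getD j.toNat []).any (fun g => g.contains team) := by
  have hj : j.toNat < schedule.length := by omega
  rw [PySem.List.pyGetD_eq_getElem _ _ h0 (by simp [dayTeamsB]; omega)]
  simp only [dayTeamsB, List.getElem_map, List.getD_eq_getElem _ _ hj]
  rw [Bool.eq_iff_iff, PySem.Set.contains_iff, PySem.Set.mem_ofList, List.mem_flatMap,
    List.any_eq_true]
  constructor
  · rintro ⟨g, hg, hc⟩; exact ⟨g, hg, by simpa using hc⟩
  · rintro ⟨g, hg, hc⟩; exact ⟨g, hg, by simpa using hc⟩

-- the two membership tests agree on every in-range day index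
theorem cond_agree (team : String) (schedule : List (List (List String))) (j : Int)
    (h0 : 0 ≤ j) (h1 : j < (schedule.length : Int)) :
    (dpA team schedule).contains j = (PySem.List.pyGetD (dayTeamsB schedule) j []).contains team := by
  rw [contains_dayTeamsB _ _ _ h0 h1, Bool.eq_iff_iff, List.contains_iff_mem, mem_dpA]
  have hj : j.toNat < schedule.length := by omega
  constructor
  · rintro ⟨k, hk, rfl, h⟩
    simp only [Int.toNat_natCast]
    rw [List.getD_eq_getElem _ _ hk]
    exact h
  · intro h
    rw [List.getD_eq_getElem _ _ hj] at h
    exact ⟨j.toNat, hj, by omega, h⟩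

-- 0/1 indicator of 'team played both day i-1 and day i' (A's membership test)
def indTB (schedule : List (List (List String))) (team : String) (i : Int) : Int :=
  if ((dpA team schedule).contains (i - 1) && (dpA team schedule).contains i) = true then 1 else 0

-- A's inner counting loop as a sum of indicators
theorem countA_eq_sum (team : String) (schedule : List (List (List String))) :
    countA (dpA team schedule) (schedule.length : Int) =
      ((PySem.List.pyRange 1 (schedule.length : Int) 1).map (indTB schedule team)).sum := by
  unfold countA
  rw [PySem.List.foldl_congr_mem _ _
      (fun c i => if ((dpA team schedule).contains (i - 1) && (dpA team schedule).contains i) = true then c + 1 else c) _ ?_]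
  · rw [PySem.List.foldl_if_add_one,
      ← PySem.List.sum_map_ite_one_zero
        (fun i => (dpA team schedule).contains (i - 1) && (dpA team schedule).contains i)
        (PySem.List.pyRange 1 (schedule.length : Int) 1)]
    rw [zero_add]
    refine congrArg (fun l => List.sum (l : List Int)) (List.map_congr_left ?_)
    intro x hx
    simp [indTB]
  · intro acc i hi
    rw [PySem.List.mem_pyRange_one] at hi
    rw [PySem.List.pyRange_one_cons (by omega : i - 1 < i + 1)]
    have h2 : i - 1 + 1 = i := by ring
    rw [h2, PySem.List.pyRange_one_cons (by omega : i < i + 1),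
      PySem.List.pyRange_one_eq_nil (by omega : i + 1 ≤ i + 1)]
    simp [List.all]

-- a dict built by inserting f(k) for each k has items (first-occurrence keys, value f k)
theorem items_foldl_insert_fn (f : String → Int) (l : List String) (s : List String) :
    (l.foldl (fun (d : PySem.Dict String Int) t => d.insert t (f t))
        (PySem.Dict.mk (s.map (fun k => (k, f k))))).items =
      (PySem.Set.update s l).map (fun k => (k, f k)) := by
  induction l generalizing s with
  | nil => simp [PySem.Set.update]
  | cons x l ih =>
    rw [List.foldl_cons, PySem.Set.update_cons]
    by_cases hx : x ∈ s
    · have hc : (PySem.Dict.mk (s.map (fun k => (k, f k)))).contains x = true := by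
        rw [PySem.Dict.contains_iff_mem_keys, PySem.Dict.keys_mk]
        simpa using hx
      have : (PySem.Dict.mk (s.map (fun k => (k, f k)))).insert x (f x) =
          PySem.Dict.mk (s.map (fun k => (k, f k))) := by
        apply PySem.Dict.ext
        rw [PySem.Dict.items_insert_of_contains _ _ hc, List.map_map]
        refine List.map_congr_left ?_
        intro k _
        by_cases h : k = x <;> simp [h]
      rw [this, PySem.Set.add_of_mem hx, ih]
    · have hc : (PySem.Dict.mk (s.map (fun k => (k, f k)))).contains x = false := by
        rw [← Bool.not_eq_true, PySem.Dict.contains_iff_mem_keys, PySem.Dict.keys_mk]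
        simpa using hx
      have : (PySem.Dict.mk (s.map (fun k => (k, f k)))).insert x (f x) =
          PySem.Dict.mk ((s ++ [x]).map (fun k => (k, f k))) := by
        apply PySem.Dict.ext
        rw [PySem.Dict.items_insert_of_not_contains _ _ hc]
        simp
      rw [this, PySem.Set.add_of_not_mem hx, ih]

-- A as a double sum, team outer
theorem b2b_count_eq_sum (teams : List String) (schedule : List (List (List String))) :
    b2b_count teams schedule =
      ((PySem.List.dedup teams).map
        (fun t => ((PySem.List.pyRange 1 (schedule.length : Int) 1).map (indTB schedule t)).sum)).sum := by
  unfold b2b_count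
  have h := items_foldl_insert_fn (fun t => countA (dpA t schedule) (schedule.length : Int)) teams []
  rw [PySem.Set.update_nil_left] at h
  simp only [List.map_nil] at h
  rw [show (PySem.Dict.mk ([] : List (String × Int))) = PySem.Dict.empty from rfl] at h
  simp only [PySem.Dict.values, h, List.map_map]
  rw [PySem.List.dedup_eq_ofList]
  refine congrArg (fun l => List.sum (l : List Int)) (List.map_congr_left ?_)
  intro t _
  exact countA_eq_sum t schedule

-- B as a double sum, day outer
theorem b2b_count_alt_eq_sum (teams : List String) (schedule : List (List (List String))) :
    b2b_count_alt teams schedule =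
      ((PySem.List.pyRange 1 (schedule.length : Int) 1).map
        (fun i => ((PySem.List.dedup teams).map (fun t => indTB schedule t i)).sum)).sum := by
  have hlen : ((dayTeamsB schedule).length : Int) = (schedule.length : Int) := by
    simp [dayTeamsB]
  simp only [b2b_count_alt, hlen]
  rw [PySem.List.foldl_congr_mem _ _
      (fun tot i => tot + ((PySem.List.dedup teams).map (fun t => indTB schedule t i)).sum) _ ?_]
  · rw [PySem.List.foldl_add, zero_add]
  · intro acc i hi
    rw [PySem.List.mem_pyRange_one] at hi
    rw [PySem.List.foldl_if_add_one
      (fun team => (PySem.List.pyGetD (dayTeamsB schedule) (i - 1) []).contains team &&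
        (PySem.List.pyGetD (dayTeamsB schedule) i []).contains team)]
    congr 1
    rw [← PySem.List.sum_map_ite_one_zero
      (fun team => (PySem.List.pyGetD (dayTeamsB schedule) (i - 1) []).contains team &&
        (PySem.List.pyGetD (dayTeamsB schedule) i []).contains team) (PySem.List.dedup teams)]
    refine congrArg (fun l => List.sum (l : List Int)) (List.map_congr_left ?_)
    intro t _
    rw [indTB, cond_agree t schedule (i - 1) (by omega) (by omega),
      cond_agree t schedule i (by omega) (by omega)]

-- sums over two index lists commute
theorem sum_comm_int {α β : Type} (l1 : List α) (l2 : List β) (f : α → β → Int) :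
    (l1.map (fun a => (l2.map (f a)).sum)).sum = (l2.map (fun b => (l1.map (fun a => f a b)).sum)).sum := by
  induction l1 with
  | nil => simp
  | cons a t ih =>
    simp only [List.map_cons, List.sum_cons, ih]
    rw [← PySem.List.sum_map_add_int]

-- ===== VERDICT (by name: the statement is the Claim_ definition above) =====
theorem b2b_count_spec : Claim_equal_b2b_count := by
  intro teams schedule _
  unfold Spec_b2b_count
  rw [b2b_count_eq_sum, b2b_count_alt_eq_sum, sum_comm_int]
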